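-- pv_equiv track=rewrite | github.com/puran-water/water-chemistry-mcp | tools/phreeqc/backend.py | _inject_selected_output_file
-- ===== SOURCE A (Python) =====
-- def _inject_selected_output_file(input_string: str, output_file: str) -> str:
--     """
--     Inject -file directive into SELECTED_OUTPUT block to capture output.
--
--     Args:
--         input_string: Original PHREEQC input
--         output_file: Path to write selected output (should already be in correct format)
--
--     Returns:
--         Modified PHREEQC input string
--     """
--     lines = input_string.split("\n")
--     result_lines = []
--     in_selected_output = False
--
--     for line in lines:
--         result_lines.append(line)
--         if line.strip().upper().startswith("SELECTED_OUTPUT"):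
--             in_selected_output = True
--             result_lines.append(f"    -file {output_file}")
--         elif (
--             in_selected_output
--             and line.strip()
--             and not line.strip().startswith("-")
--             and not line.strip().startswith("#")
--         ):
--             in_selected_output = False
--
--     return "\n".join(result_lines)
-- ===== SOURCE B (Python) =====
-- import re
--
--
-- def _inject_selected_output_file(input_string: str, output_file: str) -> str:
--     # Single regex substitution instead of a line-by-line state machine:
--     # every line starting (after whitespace) with SELECTED_OUTPUT gets the
--     # -file directive appended right after it.  A replacement *function* is
--     # used so backslashes in output_file are inserted literally.
--     return re.sub(
--         r"^\s*SELECTED_OUTPUT.*$",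
--         lambda m: m.group(0) + "\n    -file " + output_file,
--         input_string,
--         flags=re.MULTILINE | re.IGNORECASE,
--     )
-- ===== Notes on version B (the rewrite author's own statement) =====
-- stated objective: idiomatic
-- what changed: Replaces the line-by-line loop with its in_selected_output state flag (which never affects the output) by a single regex substitution re.sub(r'^\s*SELECTED_OUTPUT.*$', ..., flags=MULTILINE|IGNORECASE) with a replacement function that appends the -file directive after each matched line.
import Mathlib
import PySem

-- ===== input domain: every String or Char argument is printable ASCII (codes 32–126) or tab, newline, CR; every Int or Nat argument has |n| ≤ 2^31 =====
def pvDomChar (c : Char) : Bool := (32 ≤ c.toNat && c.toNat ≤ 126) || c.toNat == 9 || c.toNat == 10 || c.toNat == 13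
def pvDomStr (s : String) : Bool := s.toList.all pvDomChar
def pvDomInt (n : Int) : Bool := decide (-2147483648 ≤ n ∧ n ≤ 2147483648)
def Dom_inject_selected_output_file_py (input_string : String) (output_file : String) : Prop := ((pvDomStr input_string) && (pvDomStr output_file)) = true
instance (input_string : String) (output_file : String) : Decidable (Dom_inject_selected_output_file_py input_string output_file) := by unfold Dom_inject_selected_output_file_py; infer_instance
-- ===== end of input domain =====

-- B replaces A's line-by-line state machine by one regex substitution (re.sub on ^\s*SELECTED_OUTPUT.*$,
-- MULTILINE|IGNORECASE); same return value on the whole ASCII domain, similar cost.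

-- ===== PORT A =====
-- the body of A's 'for line in lines' loop (result_lines, in_selected_output as the fold state)
def stepA (output_file_chars : List Char) (acc : List (List Char) × Bool) (line : List Char) : List (List Char) × Bool :=
  let acc1 := acc.1 ++ [line]
  if PySem.Chars.startswith (PySem.Chars.upper (PySem.Chars.strip line)) "SELECTED_OUTPUT".toList then
    (acc1 ++ ["    -file ".toList ++ output_file_chars], true)
  else if acc.2 && !(PySem.Chars.strip line == ([] : List Char))
          && !PySem.Chars.startswith (PySem.Chars.strip line) ['-']
          && !PySem.Chars.startswith (PySem.Chars.strip line) ['#'] then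
    (acc1, false)
  else
    (acc1, acc.2)

def inject_selected_output_file_py (input_string : String) (output_file : String) : String :=
  String.ofList (PySem.Chars.join ['\n']
    (((PySem.Chars.splitOn input_string.toList ['\n']).foldl (stepA output_file.toList)
        (([], false) : List (List Char) × Bool)).1))

-- ===== PORT B =====
-- B-side helpers: the regex r"^\s*SELECTED_OUTPUT.*$" (MULTILINE | IGNORECASE) applied by re.sub with the
-- replacement function m.group(0) + "\n    -file " + output_file, hand-ported as a left-to-right scan that
-- attempts the anchored match at every line start.  Exact for this pattern on the ASCII domain: \s is the
-- ASCII whitespace class, the greedy \s* is forced to stop at the first non-whitespace character because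
-- the literal after it starts with a letter, IGNORECASE on ASCII letters is upper-casing, and .*$
-- (MULTILINE) extends the match up to the next '\n' or the end of the string.
def reSpace (c : Char) : Bool := decide (c.toNat = 32) || (decide (9 ≤ c.toNat) && decide (c.toNat ≤ 13))

def selTok : List Char := "SELECTED_OUTPUT".toList

def selMatch (cs : List Char) : Bool := (cs.take 15).map PySem.Chars.upperChar == selTok

theorem injectScan_dec (c : Char) (cs : List Char) :
    (List.dropWhile (fun d => !(d == '\n')) (List.dropWhile reSpace (c :: cs))).length < (c :: cs).length := by
  by_cases h : reSpace c = true
  · have h1 : List.dropWhile reSpace (c :: cs) = List.dropWhile reSpace cs := by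
      simp [h]
    have h2 := List.length_dropWhile_le (p := fun d => !(d == '\n')) (l := List.dropWhile reSpace cs)
    have h3 := List.length_dropWhile_le (p := reSpace) (l := cs)
    simp only [h1, List.length_cons]
    omega
  · have hc : ¬ (c = '\n') := by
      intro hc; subst hc; exact h (by decide)
    have h1 : List.dropWhile reSpace (c :: cs) = c :: cs := by
      simp [h]
    have h2 : List.dropWhile (fun d => !(d == '\n')) (c :: cs) = List.dropWhile (fun d => !(d == '\n')) cs := by
      simp [hc]
    have h3 := List.length_dropWhile_le (p := fun d => !(d == '\n')) (l := cs)
    simp only [h1, h2, List.length_cons]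
    omega

def injectScan (fileDir : List Char) : Bool → List Char → List Char
  | _, [] => []
  | lineStart, c :: cs =>
    if lineStart && selMatch (List.dropWhile reSpace (c :: cs)) then
      List.takeWhile reSpace (c :: cs)
        ++ List.takeWhile (fun d => !(d == '\n')) (List.dropWhile reSpace (c :: cs))
        ++ fileDir
        ++ injectScan fileDir false (List.dropWhile (fun d => !(d == '\n')) (List.dropWhile reSpace (c :: cs)))
    else
      c :: injectScan fileDir (c == '\n') cs
  termination_by _ cs => cs.length
  decreasing_by
  · exact injectScan_dec c cs
  · simp

def inject_selected_output_file_py_alt (input_string : String) (output_file : String) : String :=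
  String.ofList (injectScan ('\n' :: ("    -file ".toList ++ output_file.toList)) true input_string.toList)

-- ===== PRECONDITION & SPEC =====
def Spec_inject_selected_output_file_py (input_string : String) (output_file : String) (out : String) : Prop := out = inject_selected_output_file_py_alt input_string output_file
instance (input_string : String) (output_file : String) (out : String) : Decidable (Spec_inject_selected_output_file_py input_string output_file out) := by unfold Spec_inject_selected_output_file_py; infer_instance

-- ===== CLAIM (what is proved, stated in full; the proofs are below) =====
def Claim_equal_inject_selected_output_file_py : Prop := ∀ (input_string : String) (output_file : String), Dom_inject_selected_output_file_py input_string output_file → Spec_inject_selected_output_file_py input_string output_file (inject_selected_output_file_py input_string output_file)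

-- ===== LEMMAS AND PROOFS =====

-- A's per-line test and per-line contribution to result_lines
def condA (l : List Char) : Bool :=
  PySem.Chars.startswith (PySem.Chars.upper (PySem.Chars.strip l)) "SELECTED_OUTPUT".toList

def gA (out : List Char) (l : List Char) : List (List Char) :=
  if condA l then [l, "    -file ".toList ++ out] else [l]

-- unfolding lemmas for the scan
theorem scan_nil (f : List Char) (b : Bool) : injectScan f b [] = [] := by
  simp [injectScan]

theorem scan_cons (f : List Char) (b : Bool) (c : Char) (cs : List Char) :
    injectScan f b (c :: cs) =
      if b && selMatch (List.dropWhile reSpace (c :: cs)) then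
        List.takeWhile reSpace (c :: cs)
          ++ List.takeWhile (fun d => !(d == '\n')) (List.dropWhile reSpace (c :: cs))
          ++ f
          ++ injectScan f false (List.dropWhile (fun d => !(d == '\n')) (List.dropWhile reSpace (c :: cs)))
      else c :: injectScan f (c == '\n') cs := by
  rw [injectScan]

-- with the line-start flag off, the scan copies characters up to the next newline
theorem scan_copy (f : List Char) (ys : List Char) :
    ∀ xs : List Char, (∀ c ∈ xs, ¬ c = '\n') →
    injectScan f false (xs ++ ys) = xs ++ injectScan f false ys := by
  intro xs
  induction xs with
  | nil => intro _; simp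
  | cons c cs ih =>
    intro h
    have hc : ¬ c = '\n' := h c (List.mem_cons_self ..)
    rw [List.cons_append, scan_cons]
    simp only [Bool.false_and, if_neg (by simp : ¬ (false = true))]
    have : (c == '\n') = false := by simpa using hc
    rw [this, ih (fun d hd => h d (List.mem_cons_of_mem _ hd))]
    simp

theorem scan_copy' (f : List Char) (xs : List Char) (h : ∀ c ∈ xs, ¬ c = '\n') :
    injectScan f false xs = xs := by
  have := scan_copy f [] xs h
  simp [scan_nil] at this
  simpa using this

theorem modifyHead_idfun (l : List (List Char)) : List.modifyHead (fun x => x) l = l := by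
  cases l <;> simp

theorem scan_newline (f : List Char) (ys : List Char) :
    injectScan f false ('\n' :: ys) = '\n' :: injectScan f true ys := by
  rw [scan_cons]; simp

-- PySem's fuel-based splitOn is Mathlib's splitOnP for a one-character separator
theorem pySplit_go (fuel : Nat) : ∀ (l cur : List Char) (acc : List (List Char)), l.length ≤ fuel →
    PySem.Chars.splitOn.go ['\n'] fuel l cur acc
      = acc.reverse ++ (List.splitOnP (fun c => c == '\n') l).modifyHead (fun x => cur.reverse ++ x) := by
  induction fuel with
  | zero =>
    intro l cur acc h
    have hl : l = [] := by cases l <;> simp_all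
    subst hl
    simp [PySem.Chars.splitOn.go, List.splitOnP_nil]
  | succ n ih =>
    intro l cur acc h
    cases l with
    | nil => simp [PySem.Chars.splitOn.go, List.splitOnP_nil]
    | cons c rest =>
      rw [PySem.Chars.splitOn.go]
      by_cases hc : c = '\n'
      · subst hc
        have hpre : List.isPrefixOf ['\n'] ('\n' :: rest) = true := by
          simp [List.isPrefixOf]
        rw [if_pos hpre]
        simp only [List.length_cons] at h
        rw [show List.drop (['\n'] : List Char).length ('\n' :: rest) = rest by simp]
        rw [ih rest [] (cur.reverse :: acc) (by omega)]
        rw [List.splitOnP_cons]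
        simp [modifyHead_idfun]
      · have hpre : ¬ List.isPrefixOf ['\n'] (c :: rest) = true := by
          simp [List.isPrefixOf]
          exact fun hcc => absurd hcc.symm hc
        rw [if_neg hpre]
        simp only [List.length_cons] at h
        rw [ih rest (c :: cur) acc (by omega)]
        rw [List.splitOnP_cons]
        have : (c == '\n') = false := by simpa using hc
        rw [this]
        simp only [Bool.false_eq_true, if_neg (by simp : ¬ False)]
        rw [List.modifyHead_modifyHead]
        have : (fun x : List Char => (c :: cur).reverse ++ x) = ((fun x => cur.reverse ++ x) ∘ List.cons c) := by
          funext x; simp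
        rw [this]

theorem pySplit_eq (s : List Char) :
    PySem.Chars.splitOn s ['\n'] = List.splitOnP (fun c => c == '\n') s := by
  unfold PySem.Chars.splitOn
  rw [pySplit_go (s.length + 1) s [] [] (by omega)]
  simp [modifyHead_idfun]


-- the pieces of splitOnP are newline-free and made of characters of the original list
theorem splitOnP_pieces : ∀ (l : List Char), ∀ x ∈ List.splitOnP (fun c => c == '\n') l, ∀ c ∈ x, ¬ c = '\n' ∧ c ∈ l := by
  intro l
  induction l with
  | nil => simp [List.splitOnP_nil]
  | cons a t ih =>
    rw [List.splitOnP_cons]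
    by_cases ha : a = '\n'
    · subst ha
      simp only [beq_self_eq_true, if_pos]
      intro x hx c hc
      rcases List.mem_cons.mp hx with h1 | h1
      · subst h1; simp at hc
      · obtain ⟨hne, hm⟩ := ih x h1 c hc
        exact ⟨hne, List.mem_cons_of_mem _ hm⟩
    · have hbeq : (a == '\n') = false := by simpa using ha
      rw [hbeq]
      simp only [Bool.false_eq_true, if_neg (by simp : ¬ False)]
      obtain ⟨h0, t0, heq⟩ := List.exists_cons_of_ne_nil (List.splitOnP_ne_nil (fun c => c == '\n') t)
      rw [heq, List.modifyHead_cons]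
      intro x hx c hc
      rcases List.mem_cons.mp hx with h1 | h1
      · subst h1
        rcases List.mem_cons.mp hc with h2 | h2
        · subst h2; exact ⟨ha, List.mem_cons_self ..⟩
        · obtain ⟨hne, hm⟩ := ih h0 (heq ▸ List.mem_cons_self ..) c h2
          exact ⟨hne, List.mem_cons_of_mem _ hm⟩
      · obtain ⟨hne, hm⟩ := ih x (heq ▸ List.mem_cons_of_mem _ h1) c hc
        exact ⟨hne, List.mem_cons_of_mem _ hm⟩

-- A's fold: the in_selected_output flag never affects result_lines
theorem foldA (out : List Char) :
    ∀ (L : List (List Char)) (acc : List (List Char)) (b : Bool),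
    (L.foldl (stepA out) (acc, b)).1 = acc ++ L.flatMap (gA out) := by
  intro L
  induction L with
  | nil => intro acc b; simp
  | cons l t ih =>
    intro acc b
    simp only [List.foldl_cons, List.flatMap_cons]
    by_cases hc : condA l = true
    · have hcc := hc; unfold condA at hcc
      have hP : stepA out (acc, b) l = (acc ++ [l] ++ ["    -file ".toList ++ out], true) := by
        unfold stepA; rw [hcc]; rfl
      rw [hP, ih]
      simp [gA, hc]
    · have hcf : condA l = false := by simpa using hc
      have hcc := hcf; unfold condA at hcc
      have hP : ∃ b2, stepA out (acc, b) l = (acc ++ [l], b2) := by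
        unfold stepA; rw [hcc]
        simp only [Bool.false_eq_true, if_neg (by simp : ¬ False)]
        split
        · exact ⟨false, rfl⟩
        · exact ⟨b, rfl⟩
      obtain ⟨b2, hP⟩ := hP
      rw [hP, ih]
      simp [gA, hcf]

-- on the ASCII domain the regex class \s coincides with str.isspace
theorem reSpace_isspace {c : Char} (h : pvDomChar c = true) : reSpace c = PySem.Chars.isspace c := by
  rw [Bool.eq_iff_iff]
  unfold pvDomChar at h
  unfold reSpace PySem.Chars.isspace
  simp only [Bool.or_eq_true, Bool.and_eq_true, decide_eq_true_eq, beq_iff_eq] at h ⊢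
  omega

theorem upperChar_of_isspace {c : Char} (hd : pvDomChar c = true) (h : PySem.Chars.isspace c = true) :
    PySem.Chars.upperChar c = c := by
  unfold pvDomChar at hd
  unfold PySem.Chars.isspace at h
  simp only [Bool.or_eq_true, Bool.and_eq_true, decide_eq_true_eq, beq_iff_eq] at hd h
  have hn : c.toNat ≤ 32 := by omega
  have hlow : PySem.Chars.islower c = false := by
    unfold PySem.Chars.islower
    have hna : ¬ ('a' ≤ c) := by
      intro hle
      have h3 : (97 : Nat) ≤ c.toNat := UInt32.le_iff_toNat_le.mp (Char.le_def.mp hle)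
      omega
    simp [hna]
  unfold PySem.Chars.upperChar
  simp [hlow]

theorem selTok_all_not_space : selTok.all (fun x => !PySem.Chars.isspace x) = true := by rfl

theorem selTok_not_space : ∀ x ∈ selTok, PySem.Chars.isspace x = false := by
  intro x hx
  simpa using List.all_eq_true.mp selTok_all_not_space x hx

theorem newline_not_mem_selTok : '\n' ∉ selTok := by
  intro h
  have h1 := selTok_not_space '\n' h
  rw [show PySem.Chars.isspace '\n' = true from by decide] at h1
  exact absurd h1 (by simp)

theorem selMatch_iff (X : List Char) :
    selMatch X = true ↔ selTok <+: List.map PySem.Chars.upperChar X := by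
  unfold selMatch
  rw [beq_iff_eq, List.prefix_iff_eq_take]
  have h15 : selTok.length = 15 := rfl
  rw [h15, List.map_take]
  exact ⟨fun h => h.symm, fun h => h.symm⟩

theorem prefix_append_head {p a b : List Char} (hb : ∀ x, b.head? = some x → x ∉ p) :
    p <+: a ++ b ↔ p <+: a := by
  constructor
  · intro h
    rcases List.prefix_or_prefix_of_prefix h (List.prefix_append a b) with h1 | h1
    · exact h1
    · obtain ⟨p', rfl⟩ := h1
      have hp' : p' <+: b := (List.prefix_append_right_inj a).mp h
      cases p' with
      | nil => simp
      | cons x t =>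
        obtain ⟨u, hu⟩ := hp'
        have hxb : b.head? = some x := by rw [← hu]; rfl
        exact absurd (by simp : x ∈ a ++ x :: t) (hb x hxb)
  · intro h; exact h.trans (List.prefix_append a b)

theorem rstrip_prefix (d : List Char) : PySem.Chars.rstrip d <+: d := by
  unfold PySem.Chars.rstrip
  have h := List.dropWhile_suffix (l := d.reverse) PySem.Chars.isspace
  rw [← List.reverse_reverse (List.dropWhile PySem.Chars.isspace d.reverse)] at h
  exact List.reverse_suffix.mp h

theorem rstrip_decomp (d : List Char) :
    d = PySem.Chars.rstrip d ++ (List.takeWhile PySem.Chars.isspace d.reverse).reverse := by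
  unfold PySem.Chars.rstrip
  conv_lhs => rw [← List.reverse_reverse d,
    ← List.takeWhile_append_dropWhile (p := PySem.Chars.isspace) (l := d.reverse)]
  rw [List.reverse_append]

theorem dropWhile_reSpace_eq (l : List Char) (hDom : ∀ c ∈ l, pvDomChar c = true) :
    List.dropWhile reSpace l = List.dropWhile PySem.Chars.isspace l := by
  induction l with
  | nil => rfl
  | cons c t ih =>
    have hc := reSpace_isspace (hDom c (List.mem_cons_self ..))
    simp only [List.dropWhile_cons, hc]
    split
    · exact ih (fun d hd => hDom d (List.mem_cons_of_mem _ hd))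
    · rfl

-- A's per-line test is exactly the anchored-regex match on the whitespace-stripped line
theorem condA_eq (l : List Char) (hDom : ∀ c ∈ l, pvDomChar c = true) :
    condA l = selMatch (List.dropWhile reSpace l) := by
  rw [dropWhile_reSpace_eq l hDom]
  have hmem : ∀ c ∈ List.dropWhile PySem.Chars.isspace l, c ∈ l :=
    fun c hc => (List.dropWhile_sublist _).mem hc
  rw [Bool.eq_iff_iff, selMatch_iff]
  unfold condA PySem.Chars.startswith PySem.Chars.upper PySem.Chars.strip PySem.Chars.lstrip
  rw [List.isPrefixOf_iff_prefix]
  show selTok <+: List.map PySem.Chars.upperChar (PySem.Chars.rstrip (List.dropWhile PySem.Chars.isspace l)) ↔ _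
  set d := List.dropWhile PySem.Chars.isspace l with hd
  constructor
  · exact fun h => h.trans ((rstrip_prefix d).map _)
  · intro h
    rw [rstrip_decomp d, List.map_append] at h
    refine (prefix_append_head ?_).mp h
    intro x hx
    rw [List.head?_map] at hx
    obtain ⟨w, hw, rfl⟩ := Option.map_eq_some_iff.mp hx
    have hwmem : w ∈ (List.takeWhile PySem.Chars.isspace d.reverse).reverse := by
      cases hh : (List.takeWhile PySem.Chars.isspace d.reverse).reverse with
      | nil => rw [hh] at hw; simp at hw
      | cons y t =>
          rw [hh] at hw
          simp only [List.head?_cons, Option.some.injEq] at hw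
          exact List.mem_cons.mpr (Or.inl hw.symm)
    have hws : PySem.Chars.isspace w = true :=
      List.mem_takeWhile_imp (List.mem_reverse.mp hwmem)
    have hwd : w ∈ d := by
      have := (List.takeWhile_prefix (l := d.reverse) PySem.Chars.isspace).mem (List.mem_reverse.mp hwmem)
      exact List.mem_reverse.mp this
    rw [upperChar_of_isspace (hDom w (hmem w hwd)) hws]
    intro hwtok
    rw [selTok_not_space w hwtok] at hws
    exact absurd hws (by simp)

theorem selMatch_append_nl (d R : List Char) : selMatch (d ++ '\n' :: R) = selMatch d := by
  rw [Bool.eq_iff_iff, selMatch_iff, selMatch_iff, List.map_append, List.map_cons]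
  rw [show PySem.Chars.upperChar '\n' = '\n' from rfl]
  exact prefix_append_head (by
    intro x hx
    simp only [List.head?_cons, Option.some.injEq] at hx
    subst hx
    exact newline_not_mem_selTok)

theorem join_cons_ne (l : List Char) (M : List (List Char)) (hM : M ≠ []) :
    PySem.Chars.join ['\n'] (l :: M) = l ++ '\n' :: PySem.Chars.join ['\n'] M := by
  obtain ⟨m, M', rfl⟩ := List.exists_cons_of_ne_nil hM
  rw [PySem.Chars.join_cons_cons]
  simp

-- scanning a whitespace-only line just copies it: the \s* of a later match may reach across it,
-- but the substitution output is unchanged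
theorem reSpace_nl : reSpace '\n' = true := by decide

theorem scan_ws_line (f l R : List Char) (hws : ∀ c ∈ l, reSpace c = true) (hnl : ∀ c ∈ l, ¬ c = '\n') :
    injectScan f true (l ++ '\n' :: R) = l ++ '\n' :: injectScan f true R := by
  have hdropl : List.dropWhile reSpace l = [] := List.dropWhile_eq_nil_iff.mpr hws
  have htakel : List.takeWhile reSpace l = l := List.takeWhile_eq_self_iff.mpr hws
  have hdrop : List.dropWhile reSpace (l ++ '\n' :: R) = List.dropWhile reSpace R := by
    rw [List.dropWhile_append, hdropl]
    simp [reSpace_nl]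
  by_cases m : selMatch (List.dropWhile reSpace R) = true
  · have hRd : List.dropWhile reSpace R ≠ [] := by
      intro h0; rw [h0] at m; exact absurd m (by decide)
    have hRne : R ≠ [] := by rintro rfl; simp at hRd
    obtain ⟨r, R₂, rfl⟩ := List.exists_cons_of_ne_nil hRne
    have htake : List.takeWhile reSpace (l ++ '\n' :: r :: R₂) = l ++ '\n' :: List.takeWhile reSpace (r :: R₂) := by
      rw [List.takeWhile_append, htakel]
      simp [List.takeWhile_cons, reSpace_nl]
    have hRscan : injectScan f true (r :: R₂)
        = List.takeWhile reSpace (r :: R₂)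
          ++ List.takeWhile (fun d => !(d == '\n')) (List.dropWhile reSpace (r :: R₂))
          ++ f
          ++ injectScan f false (List.dropWhile (fun d => !(d == '\n')) (List.dropWhile reSpace (r :: R₂))) := by
      rw [scan_cons, m]
      simp
    cases l with
    | nil =>
      simp only [List.nil_append]
      rw [scan_cons]
      have hd2 : List.dropWhile reSpace ('\n' :: r :: R₂) = List.dropWhile reSpace (r :: R₂) := by
        simp [List.dropWhile_cons, reSpace_nl]
      have ht2 : List.takeWhile reSpace ('\n' :: r :: R₂) = '\n' :: List.takeWhile reSpace (r :: R₂) := by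
        simp [List.takeWhile_cons, reSpace_nl]
      rw [hd2, m, hRscan, ht2]
      simp [List.append_assoc]
    | cons w l₂ =>
      rw [List.cons_append, scan_cons]
      rw [show w :: (l₂ ++ '\n' :: r :: R₂) = (w :: l₂) ++ '\n' :: r :: R₂ from rfl]
      rw [hdrop, m, htake, hRscan]
      simp [List.append_assoc]
  · have mf : selMatch (List.dropWhile reSpace R) = false := by simpa using m
    cases l with
    | nil =>
      simp only [List.nil_append]
      rw [scan_cons]
      have hd2 : List.dropWhile reSpace ('\n' :: R) = List.dropWhile reSpace R := by
        simp [reSpace_nl]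
      rw [hd2, mf]
      simp
    | cons w l₂ =>
      rw [List.cons_append, scan_cons]
      rw [show w :: (l₂ ++ '\n' :: R) = (w :: l₂) ++ '\n' :: R from rfl]
      rw [hdrop, mf]
      simp only [Bool.and_false, Bool.false_eq_true, if_neg (by simp : ¬ False)]
      have hw : (w == '\n') = false := by simpa using hnl w (List.mem_cons_self ..)
      rw [hw, scan_copy f ('\n' :: R) l₂ (fun d hd => hnl d (List.mem_cons_of_mem _ hd)), scan_newline]
      simp

-- the scan over the joined lines produces exactly A's per-line insertions
theorem scan_join (out : List Char) :
    ∀ L : List (List Char), (∀ x ∈ L, ∀ c ∈ x, pvDomChar c = true ∧ ¬ c = '\n') →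
    injectScan ('\n' :: ("    -file ".toList ++ out)) true (PySem.Chars.join ['\n'] L)
      = PySem.Chars.join ['\n'] (L.flatMap (gA out)) := by
  intro L
  induction L with
  | nil => intro _; rw [List.flatMap_nil, PySem.Chars.join_nil, scan_nil]
  | cons l t ih =>
    intro h
    have hDl : ∀ c ∈ l, pvDomChar c = true := fun c hc => (h l (List.mem_cons_self ..) c hc).1
    have hNl : ∀ c ∈ l, ¬ c = '\n' := fun c hc => (h l (List.mem_cons_self ..) c hc).2
    have hCE : condA l = selMatch (List.dropWhile reSpace l) := condA_eq l hDl
    have hih := ih (fun x hx c hc => h x (List.mem_cons_of_mem _ hx) c hc)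
    have hnodl : ∀ d ∈ List.dropWhile reSpace l, (!(d == '\n')) = true :=
      fun d hd => by simpa using hNl d ((List.dropWhile_sublist _).mem hd)
    cases t with
    | nil =>
      rw [PySem.Chars.join_singleton, List.flatMap_cons, List.flatMap_nil, List.append_nil]
      unfold gA
      rw [hCE]
      by_cases hm : selMatch (List.dropWhile reSpace l) = true
      · cases l with
        | nil => exact absurd hm (by decide)
        | cons c cs =>
          rw [hm, scan_cons, hm]
          have hq1 : List.takeWhile (fun d => !(d == '\n')) (List.dropWhile reSpace (c :: cs))
              = List.dropWhile reSpace (c :: cs) := List.takeWhile_eq_self_iff.mpr hnodl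
          have hq2 : List.dropWhile (fun d => !(d == '\n')) (List.dropWhile reSpace (c :: cs)) = [] :=
            List.dropWhile_eq_nil_iff.mpr hnodl
          rw [hq1, hq2, scan_nil]
          conv_rhs => rw [← List.takeWhile_append_dropWhile (p := reSpace) (l := c :: cs)]
          simp [PySem.Chars.join_cons_cons, PySem.Chars.join_singleton, List.append_assoc]
      · have hmf : selMatch (List.dropWhile reSpace l) = false := by simpa using hm
        rw [hmf]
        simp only [Bool.false_eq_true, if_neg (by simp : ¬ False), PySem.Chars.join_singleton]
        cases l with
        | nil => exact scan_nil _ _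
        | cons c cs =>
          rw [scan_cons, hmf]
          simp only [Bool.and_false, Bool.false_eq_true, if_neg (by simp : ¬ False)]
          have hc : (c == '\n') = false := by simpa using hNl c (List.mem_cons_self ..)
          rw [hc, scan_copy' _ cs (fun d hd => hNl d (List.mem_cons_of_mem _ hd))]
    | cons l2 t2 =>
      have hflat2 : List.flatMap (gA out) (l2 :: t2) ≠ [] := by
        rw [List.flatMap_cons]
        unfold gA
        split <;> simp
      rw [PySem.Chars.join_cons_cons]
      rw [show l ++ ['\n'] ++ PySem.Chars.join ['\n'] (l2 :: t2)
            = l ++ '\n' :: PySem.Chars.join ['\n'] (l2 :: t2) by simp]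
      rw [List.flatMap_cons]
      by_cases hall : ∀ c ∈ l, reSpace c = true
      · have hd0 : List.dropWhile reSpace l = [] := List.dropWhile_eq_nil_iff.mpr hall
        have hgl : gA out l = [l] := by
          unfold gA
          rw [hCE, hd0]
          rfl
        rw [scan_ws_line _ l _ hall hNl, hih, hgl]
        rw [show ([l] ++ List.flatMap (gA out) (l2 :: t2)) = l :: List.flatMap (gA out) (l2 :: t2) from rfl]
        rw [join_cons_ne _ _ hflat2]
      · have hdne : List.dropWhile reSpace l ≠ [] := fun h0 => hall (List.dropWhile_eq_nil_iff.mp h0)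
        have hlne : l ≠ [] := by rintro rfl; exact hdne rfl
        obtain ⟨c, cs, rfl⟩ := List.exists_cons_of_ne_nil hlne
        have hdropw : List.dropWhile reSpace ((c :: cs) ++ '\n' :: PySem.Chars.join ['\n'] (l2 :: t2))
            = List.dropWhile reSpace (c :: cs) ++ '\n' :: PySem.Chars.join ['\n'] (l2 :: t2) := by
          rw [List.dropWhile_append, if_neg (by simp [List.isEmpty_iff, hdne])]
        have htakew : List.takeWhile reSpace ((c :: cs) ++ '\n' :: PySem.Chars.join ['\n'] (l2 :: t2))
            = List.takeWhile reSpace (c :: cs) := by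
          rw [List.takeWhile_append, if_neg ?_]
          intro hlen
          exact hall (List.takeWhile_eq_self_iff.mp ((List.takeWhile_prefix reSpace).eq_of_length hlen))
        by_cases hm : selMatch (List.dropWhile reSpace (c :: cs)) = true
        · have hgl : gA out (c :: cs) = [c :: cs, "    -file ".toList ++ out] := by
            unfold gA
            rw [hCE, hm]
            rfl
          rw [List.cons_append, scan_cons]
          rw [show c :: (cs ++ '\n' :: PySem.Chars.join ['\n'] (l2 :: t2))
                = (c :: cs) ++ '\n' :: PySem.Chars.join ['\n'] (l2 :: t2) from rfl]
          rw [hdropw, selMatch_append_nl, hm]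
          simp only [Bool.and_self, if_true]
          rw [htakew]
          have hq1 : List.takeWhile (fun d => !(d == '\n'))
              (List.dropWhile reSpace (c :: cs) ++ '\n' :: PySem.Chars.join ['\n'] (l2 :: t2))
              = List.dropWhile reSpace (c :: cs) := by
            rw [List.takeWhile_append,
              if_pos (by rw [List.takeWhile_eq_self_iff.mpr hnodl])]
            simp
          have hq2 : List.dropWhile (fun d => !(d == '\n'))
              (List.dropWhile reSpace (c :: cs) ++ '\n' :: PySem.Chars.join ['\n'] (l2 :: t2))
              = '\n' :: PySem.Chars.join ['\n'] (l2 :: t2) := by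
            rw [List.dropWhile_append,
              if_pos (by rw [List.dropWhile_eq_nil_iff.mpr hnodl]; rfl)]
            simp
          rw [hq1, hq2, scan_newline, hih, hgl]
          rw [show ([c :: cs, "    -file ".toList ++ out] ++ List.flatMap (gA out) (l2 :: t2))
                = (c :: cs) :: ("    -file ".toList ++ out) :: List.flatMap (gA out) (l2 :: t2) from rfl]
          conv_rhs => rw [← List.takeWhile_append_dropWhile (p := reSpace) (l := c :: cs)]
          simp [PySem.Chars.join_cons_cons, List.append_assoc]
          rw [join_cons_ne _ _ (by unfold gA; split <;> simp)]
          simp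
        · have hmf : selMatch (List.dropWhile reSpace (c :: cs)) = false := by simpa using hm
          have hgl : gA out (c :: cs) = [c :: cs] := by
            unfold gA
            rw [hCE, hmf]
            rfl
          rw [List.cons_append, scan_cons]
          rw [show c :: (cs ++ '\n' :: PySem.Chars.join ['\n'] (l2 :: t2))
                = (c :: cs) ++ '\n' :: PySem.Chars.join ['\n'] (l2 :: t2) from rfl]
          rw [hdropw, selMatch_append_nl, hmf]
          simp only [Bool.and_false, Bool.false_eq_true, if_neg (by simp : ¬ False)]
          have hc : (c == '\n') = false := by simpa using hNl c (List.mem_cons_self ..)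
          rw [hc, scan_copy _ ('\n' :: PySem.Chars.join ['\n'] (l2 :: t2)) cs
              (fun d hd => hNl d (List.mem_cons_of_mem _ hd)), scan_newline, hih, hgl]
          rw [show ([c :: cs] ++ List.flatMap (gA out) (l2 :: t2))
                = (c :: cs) :: List.flatMap (gA out) (l2 :: t2) from rfl]
          rw [join_cons_ne _ _ hflat2]
          simp

-- ===== VERDICT (by name: the statement is the Claim_ definition above) =====
theorem inject_selected_output_file_py_spec : Claim_equal_inject_selected_output_file_py := by
  intro s out hDom
  unfold Spec_inject_selected_output_file_py
  unfold inject_selected_output_file_py inject_selected_output_file_py_alt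
  have hDs : ∀ c ∈ s.toList, pvDomChar c = true := by
    unfold Dom_inject_selected_output_file_py pvDomStr at hDom
    simp only [Bool.and_eq_true, List.all_eq_true] at hDom
    exact hDom.1
  have hpieces : ∀ x ∈ List.splitOnP (fun c => c == '\n') s.toList, ∀ c ∈ x, pvDomChar c = true ∧ ¬ c = '\n' := by
    intro x hx c hc
    obtain ⟨hne, hmem⟩ := splitOnP_pieces s.toList x hx c hc
    exact ⟨hDs c hmem, hne⟩
  have hj : PySem.Chars.join ['\n'] (List.splitOnP (fun c => c == '\n') s.toList) = s.toList := by
    show (['\n'] : List Char).intercalate _ = _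
    rw [show List.splitOnP (fun c => c == '\n') s.toList = List.splitOn '\n' s.toList from rfl]
    exact List.intercalate_splitOn s.toList '\n'
  rw [pySplit_eq, foldA]
  conv_rhs => rw [← hj]
  rw [scan_join out.toList _ hpieces]
  simp
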